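-- pv_equiv track=rewrite | github.com/IJS-Zzz/temporary | badcode_refactored.py | is_funny_function
-- ===== SOURCE A (Python) =====
-- def is_funny_function(data):
--     """
--     Sorted array check function.
--
--     Params:
--         data: list[int]
--     Return: bool
--
--     Return True in the following situations:
--         - all items is equals
--         - items is growing or decreasing by 1
--
--     Raised ValueError if the data is empty.
--     """
--     if not data:
--         raise ValueError("data is None")
--
--     if len(data) == 1:
--         return True
--
--     # check that all items is equal
--     counter = {}
--     for v in data:
--         counter[v] = counter.get(v, 0) + 1
--         if len(counter) > 1:
--             break
--     else:
--         return True
--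
--     # check that the array is growing or decreasing by 1
--     to_up = True
--     to_low = True
--     for i in range(1, len(data)):
--         pre = int(data[i-1])
--         now = int(data[i])
--
--         # validate growing
--         if to_up and now != pre + 1:
--             to_up = False
--
--         # validate decreasing
--         if to_low and now != pre - 1:
--             to_low = False
--
--         if not to_up and not to_low:
--             return False
--
--     return True
-- ===== SOURCE B (Python) =====
-- def is_funny_function(data):
--     if not data:
--         raise ValueError("data is None")
--     if len(data) == 1:
--         return True
--     if all(x == data[0] for x in data):
--         return True
--     ints = [int(x) for x in data]
--     n = len(ints)
--     return ints == list(range(ints[0], ints[0] + n)) or \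
--            ints == list(range(ints[0], ints[0] - n, -1))
-- ===== Notes on version B (the rewrite author's own statement) =====
-- stated objective: simpler
-- what changed: Replaces A's dict-counter break/else loop and the two-flag adjacent scan with an all-equal check plus direct comparison of the list against the expected ascending/descending range built in closed form.
import Mathlib
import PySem

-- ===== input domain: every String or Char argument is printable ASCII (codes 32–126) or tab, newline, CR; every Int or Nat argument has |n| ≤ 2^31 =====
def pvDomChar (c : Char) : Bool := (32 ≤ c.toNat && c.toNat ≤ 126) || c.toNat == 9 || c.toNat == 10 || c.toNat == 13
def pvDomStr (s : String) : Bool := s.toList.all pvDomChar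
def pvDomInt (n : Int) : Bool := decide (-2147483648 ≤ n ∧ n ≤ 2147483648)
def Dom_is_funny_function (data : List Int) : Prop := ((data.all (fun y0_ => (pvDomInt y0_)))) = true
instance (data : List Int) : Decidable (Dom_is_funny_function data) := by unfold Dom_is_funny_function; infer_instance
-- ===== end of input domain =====

-- B replaces A's dict-counter break/else loop and two-flag adjacent scan with an
-- all-equal check plus comparison against the expected ascending/descending range (objective: simpler).

-- ===== PORT A =====
-- the counter loop: insert each value, break (return to the ±1 scan) as soon as the dict has > 1 key;
-- falling off the end (for-else) returns True
def aCountLoop (xs : List Int) (counter : PySem.Dict Int Int) : Bool :=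
  match xs with
  | [] => true
  | v :: rest =>
    let counter := counter.insert v (counter.getD v 0 + 1)
    if counter.size > 1 then false else aCountLoop rest counter

-- the index loop 'for i in range(1, len(data))' walked structurally: pre = data[i-1], now = data[i]
def aScan (pre : Int) (xs : List Int) (to_up to_low : Bool) : Bool :=
  match xs with
  | [] => true
  | now :: rest =>
    let to_up := if to_up && !(now == pre + 1) then false else to_up
    let to_low := if to_low && !(now == pre - 1) then false else to_low
    if !to_up && !to_low then false else aScan now rest to_up to_low

def is_funny_function (data : List Int) : Bool :=
  match data with
  | [] => true   -- Python A raises ValueError here; excluded by Pre_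
  | v :: rest =>
    if rest.isEmpty then true
    else if aCountLoop (v :: rest) PySem.Dict.empty then true
    else aScan v rest true true

-- ===== PORT B =====
def is_funny_function_alt (data : List Int) : Bool :=
  match data with
  | [] => true   -- Python B raises ValueError here; excluded by Pre_
  | x :: rest =>
    if rest.isEmpty then true
    else if data.all (fun y => y == x) then true
    else decide (data = PySem.List.pyRange x (x + data.length) 1)
      || decide (data = PySem.List.pyRange x (x - data.length) (-1))

-- ===== PRECONDITION & SPEC =====
-- Pre_ excludes only the empty list, on which both Pythons raise ValueError.
def Pre_is_funny_function (data : List Int) : Prop := data ≠ []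
instance (data : List Int) : Decidable (Pre_is_funny_function data) := by unfold Pre_is_funny_function; infer_instance
def pvWitness_is_funny_function : List Int := [3, 4, 5]

def Spec_is_funny_function (data : List Int) (out : Bool) : Prop := out = is_funny_function_alt data
instance (data : List Int) (out : Bool) : Decidable (Spec_is_funny_function data out) := by unfold Spec_is_funny_function; infer_instance

-- ===== CLAIM (what is proved, stated in full; the proofs are below) =====
def Claim_equal_is_funny_function : Prop := ∀ (data : List Int), Dom_is_funny_function data → Pre_is_funny_function data → Spec_is_funny_function data (is_funny_function data)

-- ===== LEMMAS AND PROOFS =====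

-- characterisations of A's two loops
def upChain (pre : Int) : List Int → Bool
  | [] => true
  | now :: rest => (now == pre + 1) && upChain now rest

def downChain (pre : Int) : List Int → Bool
  | [] => true
  | now :: rest => (now == pre - 1) && downChain now rest

theorem aScan_eq (xs : List Int) : ∀ (pre : Int) (u l : Bool), (u || l) = true →
    aScan pre xs u l = (u && upChain pre xs || l && downChain pre xs) := by
  induction xs with
  | nil => intro pre u l h; simp [aScan, upChain, downChain]; revert h; cases u <;> cases l <;> simp
  | cons now rest ih =>
    intro pre u l h
    simp only [aScan, upChain, downChain]
    by_cases hu : (now == pre + 1) = true <;> by_cases hl : (now == pre - 1) = true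
    · exfalso; simp at hu hl; omega
    · cases u <;> cases l <;> simp [hu, hl] at h ⊢ <;>
        (rw [ih _ _ _ (by simp)]; cases upChain now rest <;> simp)
    · cases u <;> cases l <;> simp [hu, hl] at h ⊢ <;>
        (rw [ih _ _ _ (by simp)]; cases downChain now rest <;> simp)
    · cases u <;> cases l <;> simp [hu, hl] at h ⊢

theorem aCountLoop_single (xs : List Int) : ∀ (v k : Int),
    aCountLoop xs (PySem.Dict.mk [(v, k)]) = xs.all (fun y => y == v) := by
  induction xs with
  | nil => intro v k; simp [aCountLoop]
  | cons w rest ih =>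
    intro v k
    by_cases h : (w == v) = true
    · simp only [List.all_cons, h, Bool.true_and]
      have hv : w = v := by simpa using h
      subst hv
      simp [aCountLoop, PySem.Dict.insert, PySem.Dict.getD, PySem.Dict.get?, PySem.Dict.size, ih]
    · simp only [List.all_cons, h, Bool.false_and]
      have h2 : ¬ (v = w) := fun e => h (by simp [e])
      simp [aCountLoop, PySem.Dict.insert, PySem.Dict.getD, PySem.Dict.get?, PySem.Dict.size, h2]

theorem aCount_eq (v : Int) (rest : List Int) :
    aCountLoop (v :: rest) PySem.Dict.empty = rest.all (fun y => y == v) := by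
  simp [aCountLoop, PySem.Dict.insert, PySem.Dict.getD, PySem.Dict.get?, PySem.Dict.size,
        PySem.Dict.empty, aCountLoop_single]

theorem upChain_eq_range (rest : List Int) : ∀ (x : Int),
    upChain x rest = decide (x :: rest = PySem.List.pyRange x (x + ((x :: rest).length : Int)) 1) := by
  induction rest with
  | nil =>
    intro x
    simp [upChain, PySem.List.pyRange_one_singleton]
  | cons now rest' ih =>
    intro x
    have hlen : (x : Int) < x + ((x :: now :: rest').length : Int) := by
      simp; omega
    rw [PySem.List.pyRange_one_cons hlen]
    by_cases h : (now == x + 1) = true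
    · have hv : now = x + 1 := by simpa using h
      subst hv
      simp only [upChain, h, Bool.true_and]
      rw [ih (x + 1)]
      have : x + ((x :: (x+1) :: rest').length : Int) = (x + 1) + (((x+1) :: rest').length : Int) := by
        simp; omega
      rw [this]
      simp
    · have hv : now ≠ x + 1 := by simpa using h
      simp only [upChain, h, Bool.false_and]
      have hc : (x + 1 : Int) < x + ((x :: now :: rest').length : Int) := by simp
      rw [PySem.List.pyRange_one_cons hc]
      simp [hv]

theorem downChain_eq_range (rest : List Int) : ∀ (x : Int),
    downChain x rest = decide (x :: rest = PySem.List.pyRange x (x - ((x :: rest).length : Int)) (-1)) := by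
  induction rest with
  | nil =>
    intro x
    have h : x - ((x :: ([] : List Int)).length : Int) < x := by simp
    rw [PySem.List.pyRange_neg_one_cons h]
    rw [PySem.List.pyRange_neg_one_eq_nil (by simp)]
    simp [downChain]
  | cons now rest' ih =>
    intro x
    have hlen : x - ((x :: now :: rest').length : Int) < x := by simp; omega
    rw [PySem.List.pyRange_neg_one_cons hlen]
    by_cases h : (now == x - 1) = true
    · have hv : now = x - 1 := by simpa using h
      subst hv
      simp only [downChain, h, Bool.true_and]
      rw [ih (x - 1)]
      have : x - ((x :: (x-1) :: rest').length : Int) = (x - 1) - (((x-1) :: rest').length : Int) := by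
        simp; omega
      rw [this]
      simp
    · have hv : now ≠ x - 1 := by simpa using h
      simp only [downChain, h, Bool.false_and]
      have hc : x - ((x :: now :: rest').length : Int) < x - 1 := by simp
      rw [PySem.List.pyRange_neg_one_cons hc]
      simp [hv]

-- ===== VERDICT (by name: the statement is the Claim_ definition above) =====
theorem is_funny_function_spec : Claim_equal_is_funny_function := by
  intro data _ hpre
  unfold Spec_is_funny_function
  match data with
  | [] => exact absurd rfl hpre
  | x :: rest =>
    simp only [is_funny_function, is_funny_function_alt]
    by_cases hr : rest.isEmpty
    · simp [hr]
    · simp only [hr, Bool.false_eq_true, if_false]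
      rw [aCount_eq]
      have hall : (x :: rest).all (fun y => y == x) = rest.all (fun y => y == x) := by simp
      rw [hall]
      by_cases he : rest.all (fun y => y == x) = true
      · simp [he]
      · simp only [Bool.not_eq_true] at he
        simp only [he, Bool.false_eq_true, if_false]
        rw [aScan_eq rest x true true (by simp)]
        simp only [Bool.true_and]
        rw [upChain_eq_range, downChain_eq_range]
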